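-- pv_equiv track=rewrite | github.com/denis-lynn/FIT3155 | a1/30580390 2/q2/q2.py | match_prefix_preprocess
-- ===== SOURCE A (Python) =====
-- def compare(string, comp_char_index, prefix_index=0):
--     matches = 0
--     while (comp_char_index < len(string)) and (string[comp_char_index] == string[prefix_index]):
--         matches += 1
--         prefix_index += 1
--         comp_char_index += 1
--     return matches
--
-- def z_algorithm(txt):
--     n = len(txt)
--     z_values = []
--     left = 0
--     right = 0
--     k = 1
--
--     while k < n:
--         # base case
--         if k == 1:
--             res = compare(txt, k)
--             if res == 0:
--                 z_values.append(res)
--             else: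
--                 left, right = 1, res
--                 z_values.append(res)
--         # case 1
--         elif k > right:
--             res = compare(txt, k)
--             if res == 0:
--                 z_values.append(res)
--             else:
--                 z_values.append(res)
--                 left, right = k, k + res - 1
--         # case 2
--         elif k <= right:
--             prev_z_value = k - left - 1
--             prev_right_distance = right - k + 1
--             if z_values[prev_z_value] < prev_right_distance:
--                 z_values.append(z_values[prev_z_value])
--             else:
--                 res = compare(txt, right + 1, prev_right_distance)
--                 z_values.append(prev_right_distance + res)
--                 left, right = k, right + res
--         k += 1
--     return z_values
--
-- def match_prefix_preprocess(pat):
--     m = len(pat)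
--     mp_arr = [m]
--     for i in range(m):
--         mp_arr.append(0)
--     z_values = z_algorithm(pat)
--     longest_suffix = 0
--     for i in range(len(z_values) - 1, -1, -1):
--         if z_values[i] > longest_suffix:
--             longest_suffix = z_values[i]
--         mp_arr[i + 1] = longest_suffix
--     return mp_arr
-- ===== SOURCE B (Python) =====
-- def match_prefix_preprocess(pat):
--     m = len(pat)
--     z = []
--     for k in range(1, m):
--         j = 0
--         while k + j < m and pat[k + j] == pat[j]:
--             j += 1
--         z.append(j)
--     if m == 0:
--         return [0]
--     suf = []
--     best = 0
--     for v in reversed(z):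
--         best = max(best, v)
--         suf.append(best)
--     return [m] + suf[::-1] + [0]
-- ===== Notes on version B (the rewrite author's own statement) =====
-- stated objective: simpler
-- what changed: Replaces the Z-algorithm's window/box bookkeeping (left/right reuse with three cases) by a direct naive LCP scan per position, followed by a suffix running-max pass written as an accumulate over the reversed list instead of in-place index updates.
import Mathlib
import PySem

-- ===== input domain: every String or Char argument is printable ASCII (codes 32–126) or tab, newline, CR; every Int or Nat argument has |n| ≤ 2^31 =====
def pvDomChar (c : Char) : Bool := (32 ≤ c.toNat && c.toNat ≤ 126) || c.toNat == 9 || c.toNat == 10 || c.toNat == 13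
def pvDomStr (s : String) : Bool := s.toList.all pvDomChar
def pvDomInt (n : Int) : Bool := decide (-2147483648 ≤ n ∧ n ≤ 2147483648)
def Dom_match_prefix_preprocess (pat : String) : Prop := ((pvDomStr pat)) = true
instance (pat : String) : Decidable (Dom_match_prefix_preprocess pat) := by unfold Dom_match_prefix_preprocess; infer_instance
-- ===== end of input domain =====

-- B replaces A's Z-algorithm window reuse by a direct naive LCP scan per position and
-- an accumulate-style suffix-max pass (simpler; same return value on every input).

-- ===== PORT A =====
-- A.compare(string, comp_char_index, prefix_index): count of matching chars
def pyCompare (s : List Char) (i j : Nat) : Nat :=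
  if h : i < s.length ∧ s.getD i ' ' = s.getD j ' ' then pyCompare s (i+1) (j+1) + 1 else 0
termination_by s.length - i
decreasing_by omega

-- the while-loop of A.z_algorithm, state (k, z_values, left, right)
def zLoop (s : List Char) (k : Nat) (zv : List Int) (l r : Nat) : List Int :=
  if _hk : k < s.length then
    if k = 1 then
      if pyCompare s k 0 = 0 then zLoop s (k+1) (zv ++ [(pyCompare s k 0 : Int)]) l r
      else zLoop s (k+1) (zv ++ [(pyCompare s k 0 : Int)]) 1 (pyCompare s k 0)
    else if r < k then
      if pyCompare s k 0 = 0 then zLoop s (k+1) (zv ++ [(pyCompare s k 0 : Int)]) l r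
      else zLoop s (k+1) (zv ++ [(pyCompare s k 0 : Int)]) k (k + pyCompare s k 0 - 1)
    else
      if zv.getD (k - l - 1) 0 < ((r - k + 1 : Nat) : Int) then
        zLoop s (k+1) (zv ++ [zv.getD (k - l - 1) 0]) l r
      else
        zLoop s (k+1) (zv ++ [((r - k + 1 + pyCompare s (r+1) (r - k + 1) : Nat) : Int)]) k
          (r + pyCompare s (r+1) (r - k + 1))
  else zv
termination_by s.length - k
decreasing_by all_goals omega

-- the final descending loop of A: i from t-1 down to 0, mp_arr[i+1] = longest_suffix
def mpLoop (zv : List Int) (t : Nat) (ls : Int) (mp : List Int) : List Int :=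
  match t with
  | 0 => mp
  | i + 1 =>
      let v := zv.getD i 0
      let ls' := if ls < v then v else ls
      mpLoop zv i ls' (mp.set (i+1) ls')

def match_prefix_preprocess (pat : String) : List Int :=
  let s := pat.toList
  let m := s.length
  let mp : List Int := (m : Int) :: List.replicate m (0 : Int)
  let zv := zLoop s 1 [] 0 0
  mpLoop zv zv.length 0 mp

-- ===== PORT B =====
-- B's inner while: j = 0; while k+j < m and pat[k+j] == pat[j]: j += 1; returns final j
def lcpAux (s : List Char) (k : Nat) (j : Nat) : Nat :=
  if h : k + j < s.length ∧ s.getD (k+j) ' ' = s.getD j ' ' then lcpAux s k (j+1) else j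
termination_by s.length - (k + j)
decreasing_by omega

def match_prefix_preprocess_alt (pat : String) : List Int :=
  let s := pat.toList
  let m := s.length
  let z : List Int := (List.range' 1 (m - 1)).map (fun k => (lcpAux s k 0 : Int))
  if m = 0 then [0]
  else
    let st := z.reverse.foldl (fun (st : List Int × Int) v =>
      let b := max st.2 v; (st.1 ++ [b], b)) ([], 0)
    ((m : Int) :: st.1.reverse) ++ [0]

-- ===== PRECONDITION & SPEC =====
def Spec_match_prefix_preprocess (pat : String) (out : List Int) : Prop := out = match_prefix_preprocess_alt pat
instance (pat : String) (out : List Int) : Decidable (Spec_match_prefix_preprocess pat out) := by unfold Spec_match_prefix_preprocess; infer_instance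

-- ===== CLAIM (what is proved, stated in full; the proofs are below) =====
def Claim_equal_match_prefix_preprocess : Prop := ∀ (pat : String), Dom_match_prefix_preprocess pat → Spec_match_prefix_preprocess pat (match_prefix_preprocess pat)

-- ===== LEMMAS AND PROOFS =====

-- lcpAux is pyCompare shifted by the already-matched offset
theorem lcpAux_eq_pyCompare (s : List Char) (k : Nat) :
    ∀ j, lcpAux s k j = j + pyCompare s (k+j) j := by
  intro j
  fun_induction lcpAux s k j with
  | case1 j h ih =>
      rw [pyCompare, dif_pos h]
      rw [show k + (j+1) = (k+j) + 1 from by omega] at ih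
      omega
  | case2 j h =>
      rw [pyCompare, dif_neg h]; omega

-- basic facts about pyCompare
theorem pyCompare_match (s : List Char) (i j : Nat) :
    ∀ t, t < pyCompare s i j → i + t < s.length ∧ s.getD (i+t) ' ' = s.getD (j+t) ' ' := by
  fun_induction pyCompare s i j with
  | case1 i j h ih =>
      intro t ht
      cases t with
      | zero => simpa using h
      | succ t' =>
          have h2 := ih t' (by omega)
          refine ⟨by omega, ?_⟩
          rw [show i + (t'+1) = (i+1) + t' from by omega,
              show j + (t'+1) = (j+1) + t' from by omega]
          exact h2.2
  | case2 i j h => intro t ht; omega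

theorem pyCompare_stop (s : List Char) (i j : Nat) :
    ¬ (i + pyCompare s i j < s.length ∧
       s.getD (i + pyCompare s i j) ' ' = s.getD (j + pyCompare s i j) ' ') := by
  fun_induction pyCompare s i j with
  | case1 i j h ih =>
      rw [show i + (pyCompare s (i+1) (j+1) + 1) = (i+1) + pyCompare s (i+1) (j+1) from by omega,
          show j + (pyCompare s (i+1) (j+1) + 1) = (j+1) + pyCompare s (i+1) (j+1) from by omega]
      exact ih
  | case2 i j h => simpa using h

theorem pyCompare_unique (s : List Char) (i j c : Nat)
    (hm : ∀ t, t < c → i + t < s.length ∧ s.getD (i+t) ' ' = s.getD (j+t) ' ')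
    (hs : ¬ (i + c < s.length ∧ s.getD (i+c) ' ' = s.getD (j+c) ' ')) :
    pyCompare s i j = c := by
  rcases Nat.lt_trichotomy (pyCompare s i j) c with hlt | heq | hgt
  · exact absurd (hm _ hlt) (pyCompare_stop s i j)
  · exact heq
  · exact absurd (pyCompare_match s i j c hgt) hs

theorem pyCompare_skip (s : List Char) (i j : Nat) :
    ∀ d, (∀ t, t < d → i + t < s.length ∧ s.getD (i+t) ' ' = s.getD (j+t) ' ') →
    pyCompare s i j = d + pyCompare s (i+d) (j+d) := by
  intro d
  induction d generalizing i j with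
  | zero => simp
  | succ d ih =>
      intro hmatch
      have h0 := hmatch 0 (by omega)
      rw [pyCompare, dif_pos (by simpa using h0)]
      have := ih (i+1) (j+1) (fun t ht => by
        have h2 := hmatch (t+1) (by omega)
        refine ⟨by omega, ?_⟩
        rw [show (i+1) + t = i + (t+1) from by omega, show (j+1) + t = j + (t+1) from by omega]
        exact h2.2)
      rw [show i + (d+1) = (i+1) + d from by omega, show j + (d+1) = (j+1) + d from by omega]
      omega

-- Z value at position k (A's compare at (k,0) = the naive LCP)
def Zv (s : List Char) (k : Nat) : Nat := pyCompare s k 0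

theorem Z_copy (s : List Char) (l r k : Nat)
    (hl1 : 1 ≤ l) (hlk : l < k) (hkr : k ≤ r)
    (hw : r - l + 1 ≤ Zv s l) (hz : Zv s (k - l) < r - k + 1) :
    Zv s k = Zv s (k - l) := by
  simp only [Zv] at hw hz ⊢
  have hlen : l + pyCompare s l 0 ≤ s.length := by
    have h1 := pyCompare_match s l 0 (pyCompare s l 0 - 1) (by omega)
    omega
  apply pyCompare_unique
  · intro t ht
    have hd := pyCompare_match s (k-l) 0 t ht
    have hw1 := pyCompare_match s l 0 ((k-l)+t) (by omega)
    refine ⟨by omega, ?_⟩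
    rw [show k + t = l + ((k-l)+t) from by omega, hw1.2]
    simpa using hd.2
  · have hstop := pyCompare_stop s (k-l) 0
    have hw1 := pyCompare_match s l 0 ((k-l) + pyCompare s (k-l) 0) (by omega)
    rintro ⟨hlt, heq⟩
    apply hstop
    refine ⟨by omega, ?_⟩
    rw [show k + pyCompare s (k-l) 0 = l + ((k-l) + pyCompare s (k-l) 0) from by omega,
        hw1.2] at heq
    simpa using heq

theorem Z_extend (s : List Char) (l r k : Nat)
    (_hl1 : 1 ≤ l) (hlk : l < k) (hkr : k ≤ r)
    (hw : r - l + 1 ≤ Zv s l) (hz : r - k + 1 ≤ Zv s (k - l)) :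
    Zv s k = (r - k + 1) + pyCompare s (r+1) (r - k + 1) := by
  simp only [Zv] at hw hz ⊢
  have hlen : l + pyCompare s l 0 ≤ s.length := by
    have h1 := pyCompare_match s l 0 (pyCompare s l 0 - 1) (by omega)
    omega
  have hskip := pyCompare_skip s k 0 (r-k+1) (fun t ht => by
    have hd := pyCompare_match s (k-l) 0 t (by omega)
    have hw1 := pyCompare_match s l 0 ((k-l)+t) (by omega)
    refine ⟨by omega, ?_⟩
    rw [show k + t = l + ((k-l)+t) from by omega, hw1.2]
    simpa using hd.2)
  rw [hskip, show k + (r-k+1) = r + 1 from by omega]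
  simp

theorem getD_map_range' (f : Nat → Int) (a n i : Nat) (h : i < n) :
    ((List.range' a n).map f).getD i 0 = f (a + i) := by
  rw [List.getD_eq_getElem?_getD, List.getElem?_map]
  simp [h]

-- the z-list A should produce
def zSpec (s : List Char) (k : Nat) : List Int :=
  (List.range' 1 (k - 1)).map (fun p => (Zv s p : Int))

theorem zSpec_concat (s : List Char) (k : Nat) (hk : 1 ≤ k) :
    zSpec s (k+1) = zSpec s k ++ [(Zv s k : Int)] := by
  unfold zSpec
  rw [show k + 1 - 1 = (k-1) + 1 from by omega, List.range'_concat, List.map_append]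
  simp [show 1 + (k-1) = k from by omega]

theorem zLoop_eq (s : List Char) :
    ∀ k zv l r, 1 ≤ k → (k ≤ s.length ∨ k - 1 = s.length - 1) →
      zv = zSpec s k →
      (k ≤ r → 1 ≤ l ∧ l < k ∧ r - l + 1 ≤ Zv s l) →
      zLoop s k zv l r = zSpec s s.length := by
  have H : ∀ n k zv l r, s.length - k ≤ n → 1 ≤ k → (k ≤ s.length ∨ k - 1 = s.length - 1) →
      zv = zSpec s k → (k ≤ r → 1 ≤ l ∧ l < k ∧ r - l + 1 ≤ Zv s l) →
      zLoop s k zv l r = zSpec s s.length := by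
    intro n
    induction n with
    | zero =>
        intro k zv l r hfuel hk1 hkor hzv hbox
        rw [zLoop, dif_neg (by omega)]
        rw [hzv]
        unfold zSpec
        rw [show k - 1 = s.length - 1 from by omega]
    | succ n ih =>
        intro k zv l r hfuel hk1 hkor hzv hbox
        by_cases hk : k < s.length
        · rw [zLoop, dif_pos hk]
          by_cases hone : k = 1
          · rw [if_pos hone]
            subst hone
            have hzv' : zv ++ [(pyCompare s 1 0 : Int)] = zSpec s 2 := by
              rw [hzv]; exact (zSpec_concat s 1 (by omega)).symm
            by_cases hres : pyCompare s 1 0 = 0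
            · rw [if_pos hres]
              exact ih 2 _ l r (by omega) (by omega) (by omega) hzv'
                (fun h2r => by
                  rcases hbox (by omega) with ⟨a, b, c⟩
                  omega)
            · rw [if_neg hres]
              exact ih 2 _ 1 (pyCompare s 1 0) (by omega) (by omega) (by omega) hzv'
                (fun h2r => ⟨by omega, by omega, by simp only [Zv]; omega⟩)
          · rw [if_neg hone]
            by_cases hcase1 : r < k
            · rw [if_pos hcase1]
              have hzv' : zv ++ [(pyCompare s k 0 : Int)] = zSpec s (k+1) := by
                rw [hzv]; exact (zSpec_concat s k hk1).symm
              by_cases hres : pyCompare s k 0 = 0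
              · rw [if_pos hres]
                exact ih (k+1) _ l r (by omega) (by omega) (by omega) hzv'
                  (fun hr => by omega)
              · rw [if_neg hres]
                exact ih (k+1) _ k (k + pyCompare s k 0 - 1) (by omega) (by omega) (by omega)
                  hzv' (fun hr => ⟨by omega, by omega, by simp only [Zv]; omega⟩)
            · rw [if_neg hcase1]
              rcases hbox (by omega) with ⟨hl1, hlk, hw⟩
              have hprev : zv.getD (k - l - 1) 0 = (Zv s (k-l) : Int) := by
                rw [hzv]
                unfold zSpec
                rw [getD_map_range' _ 1 (k-1) (k-l-1) (by omega)]
                rw [show 1 + (k-l-1) = k - l from by omega]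
              by_cases hcopy : zv.getD (k - l - 1) 0 < ((r - k + 1 : Nat) : Int)
              · rw [if_pos hcopy]
                have hzlt : Zv s (k-l) < r - k + 1 := by
                  rw [hprev] at hcopy; exact_mod_cast hcopy
                have hzk := Z_copy s l r k hl1 hlk (by omega) hw hzlt
                have hzv' : zv ++ [zv.getD (k - l - 1) 0] = zSpec s (k+1) := by
                  rw [hprev, ← hzk, hzv]; exact (zSpec_concat s k hk1).symm
                exact ih (k+1) _ l r (by omega) (by omega) (by omega) hzv'
                  (fun hr => ⟨hl1, by omega, hw⟩)
              · rw [if_neg hcopy]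
                have hzge : r - k + 1 ≤ Zv s (k-l) := by
                  rw [hprev] at hcopy
                  have := not_lt.mp hcopy
                  exact_mod_cast this
                have hzk := Z_extend s l r k hl1 hlk (by omega) hw hzge
                have hzv' : zv ++ [((r - k + 1 + pyCompare s (r+1) (r - k + 1) : Nat) : Int)] =
                    zSpec s (k+1) := by
                  rw [hzv]
                  have h3 := (zSpec_concat s k hk1).symm
                  rw [hzk] at h3
                  exact h3
                exact ih (k+1) _ k (r + pyCompare s (r+1) (r - k + 1)) (by omega) (by omega)
                  (by omega) hzv' (fun hr => ⟨by omega, by omega, by rw [hzk]; omega⟩)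
        · rw [zLoop, dif_neg hk]
          rw [hzv]
          unfold zSpec
          rw [show k - 1 = s.length - 1 from by omega]
  intro k zv l r hk1 hkor hzv hbox
  exact H (s.length - k) k zv l r (by omega) hk1 hkor hzv hbox

-- suffix running max (with floor 0), the common spec of both final passes
def sufMax : List Int → List Int
  | [] => []
  | v :: t => max v ((sufMax t).headD 0) :: sufMax t

theorem sufMax_head (l : List Int) : (sufMax l).headD 0 = l.foldr max 0 := by
  induction l with
  | nil => rfl
  | cons v t ih => simp only [sufMax, List.headD_cons, List.foldr_cons, ih]

theorem foldr_max_nonneg (l : List Int) : 0 ≤ l.foldr max 0 := by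
  induction l with
  | nil => simp
  | cons a t ih => exact le_max_of_le_right ih

theorem foldr_max_init (l : List Int) (b : Int) (hb : 0 ≤ b) :
    l.foldr max b = max (l.foldr max 0) b := by
  induction l with
  | nil => simp [max_eq_right hb]
  | cons a t ih => simp [List.foldr_cons, ih, max_assoc]

theorem sufMax_nonneg (l : List Int) : ∀ x ∈ sufMax l, 0 ≤ x := by
  induction l with
  | nil => simp [sufMax]
  | cons v t ih =>
      intro x hx
      simp only [sufMax, List.mem_cons] at hx
      rcases hx with h | h
      · have h2 := foldr_max_nonneg t
        rw [sufMax_head t] at h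
        omega
      · exact ih x h

theorem foldB_aux (z : List Int) :
    (z.foldr (fun v (st : List Int × Int) => (st.1 ++ [max st.2 v], max st.2 v)) ([], 0)).2
      = z.foldr max 0 ∧
    (z.foldr (fun v (st : List Int × Int) => (st.1 ++ [max st.2 v], max st.2 v)) ([], 0)).1.reverse
      = sufMax z := by
  induction z with
  | nil => exact ⟨rfl, rfl⟩
  | cons v t ih =>
      refine ⟨?_, ?_⟩
      · simp only [List.foldr_cons, ih.1]
        exact max_comm _ v
      · simp only [List.foldr_cons, List.reverse_append, ih.1, ih.2, sufMax]
        rw [sufMax_head]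
        simp [max_comm]

-- B's fold equals sufMax
theorem foldB_eq (z : List Int) :
    (z.reverse.foldl (fun (st : List Int × Int) v =>
      let b := max st.2 v; (st.1 ++ [b], b)) ([], 0)).1.reverse = sufMax z := by
  rw [List.foldl_reverse]
  exact (foldB_aux z).2

theorem sufMax_concat_map (ys : List Int) (v ls : Int) (h0 : 0 ≤ ls) :
    (sufMax (ys ++ [v])).map (fun x => max ls x) =
      (sufMax ys).map (fun x => max (max ls v) x) ++ [max ls v] := by
  induction ys with
  | nil =>
      simp [sufMax]
      omega
  | cons w ys' ih =>
      simp only [List.cons_append, sufMax, List.map_cons]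
      rw [List.cons_eq_cons]
      refine ⟨?_, ih⟩
      rw [sufMax_head, sufMax_head]
      have hap : (ys' ++ [v]).foldr max 0 = max (ys'.foldr max 0) (max v 0) := by
        rw [List.foldr_append]
        simpa using foldr_max_init ys' (max v 0) (by omega)
      have h3 := foldr_max_nonneg ys'
      rw [hap]
      omega

-- A's in-place descending pass equals sufMax (plus the untouched tail)
theorem mpLoop_eq (zv : List Int) :
    ∀ t ls x rest, t ≤ zv.length → t ≤ rest.length → 0 ≤ ls →
      mpLoop zv t ls (x :: rest) =
        x :: ((sufMax (zv.take t)).map (fun v => max ls v) ++ rest.drop t) := by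
  intro t
  induction t with
  | zero => intro ls x rest h1 h2 h3; simp [mpLoop, sufMax]
  | succ i ih =>
      intro ls x rest h1 h2 h3
      have hi : i < zv.length := by omega
      have hi' : i < rest.length := by omega
      rw [mpLoop]
      have hls' : (if ls < zv.getD i 0 then zv.getD i 0 else ls) = max ls (zv.getD i 0) := by
        split <;> omega
      have hstep : (x :: rest).set (i+1) (if ls < zv.getD i 0 then zv.getD i 0 else ls)
          = x :: rest.set i (max ls (zv.getD i 0)) := by rw [hls']; rfl
      rw [hstep, hls']
      rw [ih (max ls (zv.getD i 0)) x (rest.set i (max ls (zv.getD i 0))) (by omega)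
          (by simp only [List.length_set]; omega) (by omega)]
      have htake : zv.take (i+1) = zv.take i ++ [zv.getD i 0] := by
        rw [List.getD_eq_getElem zv 0 hi, List.take_add_one, List.getElem?_eq_getElem hi]
        simp
      have hdrop : (rest.set i (max ls (zv.getD i 0))).drop i
          = max ls (zv.getD i 0) :: rest.drop (i+1) := by
        rw [List.drop_eq_getElem_cons (by simpa using hi')]
        rw [List.getElem_set_self (by simp only [List.length_set]; omega)]
        rw [List.drop_set_of_lt]
        omega
      rw [htake, hdrop, sufMax_concat_map (zv.take i) (zv.getD i 0) ls h3]
      simp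

-- ===== VERDICT (by name: the statement is the Claim_ definition above) =====
theorem match_prefix_preprocess_spec : Claim_equal_match_prefix_preprocess := by
  intro pat _
  unfold Spec_match_prefix_preprocess
  simp only [match_prefix_preprocess, match_prefix_preprocess_alt]
  have hz : zLoop pat.toList 1 [] 0 0 = zSpec pat.toList pat.toList.length :=
    zLoop_eq pat.toList 1 [] 0 0 (by omega) (by omega) (by simp [zSpec])
      (fun h => absurd h (by omega))
  have hzalt : (List.range' 1 (pat.toList.length - 1)).map
      (fun k => (lcpAux pat.toList k 0 : Int)) = zSpec pat.toList pat.toList.length := by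
    unfold zSpec
    refine List.map_congr_left (fun k hk => ?_)
    rw [lcpAux_eq_pyCompare pat.toList k 0]
    simp [Zv]
  rw [hz, hzalt]
  by_cases hm : pat.toList.length = 0
  · simp [hm, zSpec, mpLoop]
  · rw [if_neg hm]
    have hlen : (zSpec pat.toList pat.toList.length).length = pat.toList.length - 1 := by
      simp [zSpec]
    rw [hlen]
    rw [mpLoop_eq (zSpec pat.toList pat.toList.length) (pat.toList.length - 1)
      0 (pat.toList.length : Int) (List.replicate pat.toList.length 0)
      (by omega) (by simp) (by omega)]
    rw [List.take_of_length_le (by omega), List.drop_replicate]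
    rw [show pat.toList.length - (pat.toList.length - 1) = 1 from by omega]
    rw [foldB_eq]
    have hmap : (sufMax (zSpec pat.toList pat.toList.length)).map (fun v => max 0 v)
        = sufMax (zSpec pat.toList pat.toList.length) := by
      rw [List.map_congr_left (fun x hx => max_eq_right (sufMax_nonneg _ x hx))]
      simp
    rw [hmap]
    simp
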